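-- pv_equiv track=rewrite | github.com/GreatParsifal/NPU | fill_hex32_from_next.py | fill_to_32bit
-- ===== SOURCE A (Python) =====
-- from typing import List
--
-- def split_overflow(line: str) -> List[str]:
--     """若某行长度 > 8，则按 8 字符一组从左到右拆分为多行。"""
--     if len(line) <= 8:
--         return [line]
--     out = []
--     i = 0
--     while i < len(line):
--         out.append(line[i : i + 8])
--         i += 8
--     return out
--
-- def fill_to_32bit(lines: List[str]) -> List[str]:
--     """
--     主逻辑：对每一行补齐到 8 个十六进制字符，借位来自下一行（右端）。
--     会就地消费后续行的低位字符；若最后仍不足，则在当前行右侧补 0。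
--     """
--     # 先把每行都处理成不超过 8 字符（>8 的分拆为多行，尽量不丢信息）
--     normalized: List[str] = []
--     for s in lines:
--         if not s:
--             continue
--         for chunk in split_overflow(s):
--             normalized.append(chunk)
--
--     i = 0
--     while i < len(normalized):
--         cur = normalized[i]
--         if len(cur) == 8:
--             i += 1
--             continue
--
--         # 借位填充（借来的数字应放到高位，原行在低位）
--         need = 8 - len(cur)
--         j = i + 1
--         while need > 0 and j < len(normalized):
--             nxt = normalized[j]
--             if not nxt:
--                 # 删除空行
--                 normalized.pop(j)
--                 continue
--             take = min(need, len(nxt))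
--             # 从下一行的右端（低位）截取 take 个字符，放到当前行高位
--             cur = nxt[-take:] + cur
--             nxt = nxt[: len(nxt) - take]
--             normalized[i] = cur
--             if nxt:
--                 normalized[j] = nxt
--             else:
--                 normalized.pop(j)  # 删除已被取空的行
--             need = 8 - len(cur)
--
--         # 文件末尾仍不足，高位补 0
--         if len(cur) < 8:
--             cur = ("0" * (8 - len(cur))) + cur
--             normalized[i] = cur
--
--         i += 1
--
--     return normalized
-- ===== SOURCE B (Python) =====
-- from typing import List
--
-- def fill_to_32bit(lines: List[str]) -> List[str]:
--     # One pass: chunk all lines into <=8-char pieces, then stream over the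
--     # chunks with an index pointer and a 'pending' leftover prefix, building
--     # the output front-to-back without any mid-list pops (O(N) total).
--     chunks: List[str] = []
--     for s in lines:
--         for k in range(0, len(s), 8):
--             chunks.append(s[k:k + 8])
--
--     out: List[str] = []
--     n = len(chunks)
--     p = 0
--     pending = None
--     while pending is not None or p < n:
--         if pending is not None:
--             cur, pending = pending, None
--         else:
--             cur = chunks[p]
--             p += 1
--         while len(cur) < 8:
--             if p >= n:
--                 cur = "0" * (8 - len(cur)) + cur
--                 break
--             nxt = chunks[p]
--             p += 1
--             take = min(8 - len(cur), len(nxt))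
--             cur = nxt[len(nxt) - take:] + cur
--             rest = nxt[:len(nxt) - take]
--             if rest:
--                 pending = rest
--         out.append(cur)
--     return out
-- ===== Notes on version B (the rewrite author's own statement) =====
-- stated objective: faster
-- what changed: A repeatedly pops donor chunks out of the middle of the normalized list and rescans, which is quadratic; B chunks once and then streams over the chunk list with an index pointer plus a 'pending' leftover prefix, emitting output front-to-back with no mid-list mutation.
import Mathlib
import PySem

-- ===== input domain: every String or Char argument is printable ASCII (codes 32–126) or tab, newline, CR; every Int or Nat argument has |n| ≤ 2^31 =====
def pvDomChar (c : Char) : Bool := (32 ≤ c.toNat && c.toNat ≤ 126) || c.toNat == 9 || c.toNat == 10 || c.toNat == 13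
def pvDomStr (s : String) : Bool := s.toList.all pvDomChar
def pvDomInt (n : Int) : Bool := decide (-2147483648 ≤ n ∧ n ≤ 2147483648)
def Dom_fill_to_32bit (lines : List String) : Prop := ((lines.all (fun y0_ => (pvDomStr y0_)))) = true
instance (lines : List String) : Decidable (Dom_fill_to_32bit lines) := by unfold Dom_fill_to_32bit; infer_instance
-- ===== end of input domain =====

-- B replaces A's quadratic pop-from-the-middle list surgery by a single forward
-- stream over the chunks (index pointer + pending leftover), building the output
-- front-to-back: same return value, O(total chars) instead of O(n^2).
-- Strings are handled as List Char throughout (PySem convention); results are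
-- rebuilt with String.ofList.

-- ===== PORT A =====

-- split_overflow's while loop (i starts at 0, i += 8 while i < len); line[i:i+8]
-- with 0 ≤ i is (line.drop i).take 8 (exact).  The fuel argument only guards
-- totality: fuel = line.length always suffices and the callers pass that.
def pvSplitLoopA (fuel : Nat) (line : List Char) (i : Nat) (out : List (List Char)) :
    List (List Char) :=
  match fuel with
  | 0 => out
  | fuel + 1 =>
      if i < line.length then pvSplitLoopA fuel line (i + 8) (out ++ [(line.drop i).take 8])
      else out

def pvSplitOverflowA (line : List Char) : List (List Char) :=
  if line.length ≤ 8 then [line] else pvSplitLoopA line.length line 0 []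

-- the normalization pass: skip empty lines, append each chunk
def pvNormA (lines : List (List Char)) : List (List Char) :=
  lines.foldl (fun acc s => if s = [] then acc else acc ++ pvSplitOverflowA s) []

-- A's inner borrow loop.  State: the whole list, i (current line), j (donor
-- position; A never increments j — pops shift the list instead), cur.
-- normalized[j] (in range by the guard) is getD; nxt[-take:] with
-- 1 ≤ take ≤ len nxt is drop (len - take); nxt[:len-take] is take (len - take).
-- fuel only guards totality (each iteration pops a line or shrinks need);
-- fuel = normalized.length suffices and pvOuterA passes that.
def pvBorrowA (fuel : Nat) (normalized : List (List Char)) (i j : Nat) (cur : List Char) :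
    List Char × List (List Char) :=
  match fuel with
  | 0 => (cur, normalized)
  | fuel + 1 =>
      if 0 < 8 - cur.length ∧ j < normalized.length then
        let nxt := normalized.getD j []
        if nxt = [] then pvBorrowA fuel (normalized.eraseIdx j) i j cur
        else
          let need := 8 - cur.length
          let tk := min need nxt.length
          let cur' := nxt.drop (nxt.length - tk) ++ cur
          let nxt' := nxt.take (nxt.length - tk)
          let norm1 := normalized.set i cur'
          if nxt' = [] then pvBorrowA fuel (norm1.eraseIdx j) i j cur'
          else pvBorrowA fuel (norm1.set j nxt') i j cur'
      else (cur, normalized)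

-- A's outer while loop over the index i; fuel = the list length bounds the
-- number of iterations (the list never grows).
def pvOuterA (fuel : Nat) (normalized : List (List Char)) (i : Nat) : List (List Char) :=
  match fuel with
  | 0 => normalized
  | fuel + 1 =>
      if i < normalized.length then
        let cur := normalized.getD i []
        if cur.length = 8 then pvOuterA fuel normalized (i + 1)
        else
          let r := pvBorrowA normalized.length normalized i (i + 1) cur
          if r.1.length < 8 then
            pvOuterA fuel (r.2.set i (List.replicate (8 - r.1.length) '0' ++ r.1)) (i + 1)
          else pvOuterA fuel r.2 (i + 1)
      else normalized

def fill_to_32bit (lines : List String) : List String :=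
  (pvOuterA (pvNormA (lines.map String.toList)).length
    (pvNormA (lines.map String.toList)) 0).map String.ofList

-- ===== PORT B =====

-- Source B's chunking double loop: for s in lines: for k in range(0, len(s), 8):
-- chunks.append(s[k:k+8]); k ∈ pyRange is ≥ 0, so s[k:k+8] = (s.drop k).take 8.
def pvChunksB (lines : List (List Char)) : List (List Char) :=
  lines.foldl
    (fun acc s =>
      acc ++ (PySem.List.pyRange 0 s.length 8).map (fun k => (s.drop k.toNat).take 8)) []

-- Source B's inner while loop: cur below 8 chars borrows from the front of the
-- remaining chunk stream; a partially consumed donor becomes the 'pending'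
-- head of the remainder (cur is then full, so the loop exits); at end of
-- stream cur is zero-padded on the left.
def pvFillB (cur : List Char) (rem : List (List Char)) : List Char × List (List Char) :=
  if cur.length < 8 then
    match rem with
    | [] => (List.replicate (8 - cur.length) '0' ++ cur, [])
    | nxt :: rest =>
        let tk := min (8 - cur.length) nxt.length
        let cur' := nxt.drop (nxt.length - tk) ++ cur
        let r := nxt.take (nxt.length - tk)
        if r = [] then pvFillB cur' rest else (cur', r :: rest)
  else (cur, rem)
termination_by structural rem

-- Source B's outer while loop: take the next line of the stream (pending first),
-- fill it, emit it, continue on the remainder.  fuel = the stream length only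
-- guards totality (every round consumes at least the stream's head).
def pvOuterB (fuel : Nat) (rem : List (List Char)) : List (List Char) :=
  match fuel, rem with
  | 0, _ => []
  | _ + 1, [] => []
  | fuel + 1, cur :: rest =>
      let r := pvFillB cur rest
      r.1 :: pvOuterB fuel r.2

def fill_to_32bit_alt (lines : List String) : List String :=
  (pvOuterB (pvChunksB (lines.map String.toList)).length
    (pvChunksB (lines.map String.toList))).map String.ofList

-- ===== PRECONDITION & SPEC =====
def Spec_fill_to_32bit (lines : List String) (out : List String) : Prop := out = fill_to_32bit_alt lines
instance (lines : List String) (out : List String) : Decidable (Spec_fill_to_32bit lines out) := by unfold Spec_fill_to_32bit; infer_instance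

-- ===== CLAIM (what is proved, stated in full; the proofs are below) =====
def Claim_equal_fill_to_32bit : Prop := ∀ (lines : List String), Dom_fill_to_32bit lines → Spec_fill_to_32bit lines (fill_to_32bit lines)

-- ===== LEMMAS AND PROOFS =====

-- B's chunking of a single line, as a named function for the lemmas
def pvChunkOf (s : List Char) : List (List Char) :=
  (PySem.List.pyRange 0 s.length 8).map (fun k => (s.drop k.toNat).take 8)

-- pyRange with a positive step, one step unfolded (specialization of pyRange_of_pos)
theorem pvPyRange_cons (a b st : Int) (h : 0 < st) (hab : a < b) :
    PySem.List.pyRange a b st = a :: PySem.List.pyRange (a + st) b st := by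
  rw [PySem.List.pyRange_of_pos _ _ h, PySem.List.pyRange_of_pos _ _ h]
  have h1 : (b - a + st - 1) / st = (b - (a + st) + st - 1) / st + 1 := by
    have : b - a + st - 1 = (b - (a + st) + st - 1) + 1 * st := by ring
    rw [this, Int.add_mul_ediv_right _ _ (by omega)]
  have h2 : 0 ≤ (b - (a + st) + st - 1) / st := Int.ediv_nonneg (by omega) (by omega)
  rw [if_pos hab, h1]
  by_cases hab2 : a + st < b
  · rw [if_pos hab2]
    have : ((b - (a + st) + st - 1) / st + 1).toNat = ((b - (a + st) + st - 1) / st).toNat + 1 := by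
      omega
    rw [this, List.range_succ_eq_map]
    simp [List.map_map, Function.comp]
    intro k _; ring
  · rw [if_neg hab2]
    have hz : (b - (a + st) + st - 1) / st = 0 := Int.ediv_eq_zero_of_lt (by omega) (by omega)
    rw [hz]; simp

theorem pvPyRange_nil (a b st : Int) (h : 0 < st) (hab : b ≤ a) :
    PySem.List.pyRange a b st = [] := by
  rw [PySem.List.pyRange_of_pos _ _ h, if_neg (by omega)]
  simp

theorem pvSplitLoopA_eq : ∀ (fuel : Nat) (line : List Char) (i : Nat) (out : List (List Char)),
    line.length ≤ i + 8 * fuel →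
    pvSplitLoopA fuel line i out =
      out ++ (PySem.List.pyRange i line.length 8).map (fun k => (line.drop k.toNat).take 8) := by
  intro fuel
  induction fuel with
  | zero =>
      intro line i out hf
      rw [pvSplitLoopA, pvPyRange_nil _ _ _ (by omega) (by exact_mod_cast hf)]
      simp
  | succ f ih =>
      intro line i out hf
      rw [pvSplitLoopA]
      by_cases h : i < line.length
      · rw [if_pos h, ih line (i + 8) _ (by omega),
            pvPyRange_cons (i : Int) (line.length : Int) 8 (by omega) (by exact_mod_cast h)]
        have h8 : (i : Int) + 8 = ((i + 8 : Nat) : Int) := by push_cast; ring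
        rw [h8]
        simp
      · rw [if_neg h, pvPyRange_nil _ _ _ (by omega) (by exact_mod_cast Nat.le_of_not_lt h)]
        simp

theorem pvSplit_eq_chunkOf (s : List Char) (hs : s ≠ []) :
    pvSplitOverflowA s = pvChunkOf s := by
  unfold pvSplitOverflowA pvChunkOf
  by_cases h : s.length ≤ 8
  · rw [if_pos h]
    have h0 : 0 < s.length := by
      cases s with
      | nil => exact absurd rfl hs
      | cons a t => simp
    rw [pvPyRange_cons _ _ _ (by omega) (by exact_mod_cast h0),
        pvPyRange_nil _ _ _ (by omega) (by exact_mod_cast h)]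
    simp [List.take_of_length_le h]
  · rw [if_neg h, pvSplitLoopA_eq s.length s 0 [] (by omega)]
    simp

theorem pvNorm_eq_chunks (lines : List (List Char)) : pvNormA lines = pvChunksB lines := by
  unfold pvNormA pvChunksB
  have hf : (fun (acc : List (List Char)) s => if s = [] then acc else acc ++ pvSplitOverflowA s)
      = fun acc s => acc ++ (if s = [] then [] else pvSplitOverflowA s) := by
    funext acc s; split_ifs <;> simp
  rw [hf, PySem.List.foldl_append_eq_flatMap, PySem.List.foldl_append_eq_flatMap]
  simp only [List.nil_append]
  apply List.flatMap_congr
  intro s _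
  by_cases hs : s = []
  · simp [hs, pvPyRange_nil 0 0 8 (by omega) le_rfl]
  · rw [if_neg hs, pvSplit_eq_chunkOf s hs]
    rfl

-- membership in pyRange 0 n 8 gives the bounds needed for the chunk invariant
theorem pvMem_chunkOf (s c : List Char) (hc : c ∈ pvChunkOf s) : c ≠ [] ∧ c.length ≤ 8 := by
  unfold pvChunkOf at hc
  rcases List.mem_map.mp hc with ⟨k, hk, rfl⟩
  rw [PySem.List.pyRange_of_pos _ _ (by omega : (0:Int) < 8)] at hk
  rcases List.mem_map.mp hk with ⟨m, hm, rfl⟩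
  simp only [List.mem_range] at hm
  constructor
  · have h8 : 8 * m < s.length := by
      split at hm
      · omega
      · omega
    apply List.ne_nil_of_length_pos
    simp only [List.length_take, List.length_drop]
    omega
  · simp

theorem pvChunksB_inv (lines : List (List Char)) :
    ∀ c ∈ pvChunksB lines, c ≠ [] ∧ c.length ≤ 8 := by
  intro c hc
  unfold pvChunksB at hc
  rw [PySem.List.foldl_append_eq_flatMap] at hc
  simp only [List.nil_append, List.mem_flatMap] at hc
  rcases hc with ⟨ss, _, hmem⟩
  exact pvMem_chunkOf ss c hmem

theorem pvFillB_inv (cur : List Char) (rem : List (List Char))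
    (h : ∀ c ∈ rem, c ≠ [] ∧ c.length ≤ 8) :
    ∀ c ∈ (pvFillB cur rem).2, c ≠ [] ∧ c.length ≤ 8 := by
  fun_induction pvFillB cur rem with
  | case1 => simp
  | case2 cur hlt nxt rest tk cur' r hr ih =>
      exact ih (fun c hc => h c (List.mem_cons_of_mem _ hc))
  | case3 cur hlt nxt rest tk cur' r hr =>
      intro c hc
      rcases List.mem_cons.mp hc with rfl | hc
      · refine ⟨hr, ?_⟩
        have := h nxt (by simp)
        simp only [r, List.length_take]
        omega
      · exact h c (List.mem_cons_of_mem _ hc)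
  | case4 cur rem hge => exact h

-- the filled tail never gets longer than the stream it came from
theorem pvFillB_len (cur : List Char) (rem : List (List Char)) :
    (pvFillB cur rem).2.length ≤ rem.length := by
  fun_induction pvFillB cur rem with
  | case1 => simp
  | case2 cur hlt nxt rest tk cur' r hr ih => exact Nat.le_succ_of_le ih
  | case3 cur hlt nxt rest tk cur' r hr => simp
  | case4 => simp

-- ... nor does its total character count plus length grow (μ-measure for induction)
theorem pvFillB_measure (cur : List Char) (rem : List (List Char)) :
    ((pvFillB cur rem).2.map List.length).sum + (pvFillB cur rem).2.length ≤
      (rem.map List.length).sum + rem.length := by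
  fun_induction pvFillB cur rem with
  | case1 => simp
  | case2 cur hlt nxt rest tk cur' r hr ih =>
      simp only [List.map_cons, List.sum_cons, List.length_cons] at ih ⊢
      omega
  | case3 cur hlt nxt rest tk cur' r hr =>
      simp only [r, List.map_cons, List.sum_cons, List.length_cons, List.length_take]
      omega
  | case4 => simp

-- surgery on a list at a known position (i = length of the prefix)
theorem pvSetMid {α : Type} (l1 l2 : List α) (x v : α) :
    (l1 ++ x :: l2).set l1.length v = l1 ++ v :: l2 := by
  rw [List.set_append, if_neg (by omega)]
  simp

theorem pvEraseMid {α : Type} (l1 l2 : List α) (x : α) :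
    (l1 ++ x :: l2).eraseIdx l1.length = l1 ++ l2 := by
  rw [List.eraseIdx_append_of_length_le (by omega)]
  simp

theorem pvGetDMid {α : Type} [Inhabited α] (l1 l2 : List α) (x d : α) :
    (l1 ++ x :: l2).getD l1.length d = x := by
  simp [List.getD]

theorem pvBorrow_eq (cs : List (List Char)) :
    ∀ (fuel : Nat) (cur x : List Char) (done : List (List Char)),
    cs.length < fuel → (∀ c ∈ cs, c ≠ []) → cur.length < 8 →
    ∃ c0 x', pvBorrowA fuel (done ++ x :: cs) done.length (done.length + 1) cur =
        (c0, done ++ x' :: (pvFillB cur cs).2)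
      ∧ (if c0.length < 8 then List.replicate (8 - c0.length) '0' ++ c0 else c0) =
          (pvFillB cur cs).1
      ∧ (¬ c0.length < 8 → x' = c0) := by
  induction cs with
  | nil =>
      intro fuel cur x done hfu hne hlt
      obtain ⟨f, rfl⟩ : ∃ f, fuel = f + 1 := ⟨fuel - 1, by omega⟩
      refine ⟨cur, x, ?_, ?_, fun h => absurd hlt h⟩
      · rw [pvBorrowA, if_neg (by simp)]
        rw [pvFillB, if_pos hlt]
      · rw [pvFillB, if_pos hlt, if_pos hlt]
  | cons nxt rest ih =>
      intro fuel cur x done hfu hne hlt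
      obtain ⟨f, rfl⟩ : ∃ f, fuel = f + 1 := ⟨fuel - 1, by omega⟩
      have hf : rest.length < f := by
        simp only [List.length_cons] at hfu
        omega
      have hnxt : nxt ≠ [] := hne nxt (by simp)
      rw [pvBorrowA, if_pos ⟨by omega, by simp⟩]
      have hget : (done ++ x :: nxt :: rest).getD (done.length + 1) [] = nxt := by
        rw [List.append_cons done x (nxt :: rest),
            show done.length + 1 = (done ++ [x]).length by simp, pvGetDMid]
      simp only [hget]
      rw [if_neg hnxt]
      set tk := min (8 - cur.length) nxt.length with htk
      set cur' := List.drop (nxt.length - tk) nxt ++ cur with hcur'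
      set r := List.take (nxt.length - tk) nxt with hr
      have hset : (done ++ x :: nxt :: rest).set done.length cur' = done ++ cur' :: nxt :: rest :=
        pvSetMid _ _ _ _
      rw [hset, pvFillB, if_pos hlt]
      have hle : tk ≤ nxt.length := by omega
      by_cases hre : r = []
      · rw [if_pos hre, if_pos hre]
        have herase : (done ++ cur' :: nxt :: rest).eraseIdx (done.length + 1) =
            done ++ cur' :: rest := by
          rw [List.append_cons done cur' (nxt :: rest),
              show done.length + 1 = (done ++ [cur']).length by simp, pvEraseMid,
              List.append_assoc]
          rfl
        rw [herase]
        by_cases hl8 : cur'.length < 8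
        · exact ih f cur' cur' done hf (fun c hc => hne c (List.mem_cons_of_mem _ hc)) hl8
        · obtain ⟨f', rfl⟩ : ∃ f', f = f' + 1 := ⟨f - 1, by omega⟩
          rw [pvBorrowA, if_neg (by omega)]
          have hfb : pvFillB cur' rest = (cur', rest) := by
            rw [pvFillB.eq_def, if_neg hl8]
          rw [hfb]
          exact ⟨cur', cur', rfl, by rw [if_neg hl8], fun _ => rfl⟩
      · rw [if_neg hre, if_neg hre]
        have hc8 : ¬ cur'.length < 8 := by
          have hr0 : nxt.length - tk ≠ 0 := fun h0 => hre (by rw [hr, h0]; rfl)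
          have : cur'.length = tk + cur.length := by
            rw [hcur']; simp [List.length_drop]; omega
          omega
        have hset2 : (done ++ cur' :: nxt :: rest).set (done.length + 1) r =
            done ++ cur' :: r :: rest := by
          rw [List.append_cons done cur' (nxt :: rest),
              show done.length + 1 = (done ++ [cur']).length by simp, pvSetMid,
              List.append_assoc]
          rfl
        obtain ⟨f', rfl⟩ : ∃ f', f = f' + 1 := ⟨f - 1, by omega⟩
        rw [hset2, pvBorrowA, if_neg (by omega)]
        exact ⟨cur', cur', rfl, by rw [if_neg hc8], fun _ => rfl⟩

theorem pvOuter_eq (n : Nat) : ∀ (cs : List (List Char)),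
    (cs.map List.length).sum + cs.length ≤ n →
    (∀ c ∈ cs, c ≠ [] ∧ c.length ≤ 8) →
    ∀ (done : List (List Char)) (fuelA fuelB : Nat),
    cs.length ≤ fuelA → cs.length ≤ fuelB →
    pvOuterA fuelA (done ++ cs) done.length = done ++ pvOuterB fuelB cs := by
  induction n with
  | zero =>
      intro cs hn hinv done fuelA fuelB hA hB
      have : cs = [] := by cases cs with
        | nil => rfl
        | cons a t => simp at hn
      subst this
      cases fuelA with
      | zero => cases fuelB <;> simp [pvOuterA, pvOuterB]
      | succ fA =>
          rw [pvOuterA, if_neg (by simp)]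
          cases fuelB <;> simp [pvOuterB]
  | succ n ih =>
      intro cs hn hinv done fuelA fuelB hA hB
      cases cs with
      | nil =>
          cases fuelA with
          | zero => cases fuelB <;> simp [pvOuterA, pvOuterB]
          | succ fA =>
              rw [pvOuterA, if_neg (by simp)]
              cases fuelB <;> simp [pvOuterB]
      | cons c rest =>
          obtain ⟨fA, rfl⟩ : ∃ f, fuelA = f + 1 := ⟨fuelA - 1, by simp at hA; omega⟩
          obtain ⟨fB, rfl⟩ : ∃ f, fuelB = f + 1 := ⟨fuelB - 1, by simp at hB; omega⟩
          have hrA : rest.length ≤ fA := by simp at hA; omega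
          have hrB : rest.length ≤ fB := by simp at hB; omega
          have hget : (done ++ c :: rest).getD done.length [] = c := pvGetDMid _ _ _ _
          have hμ : (rest.map List.length).sum + rest.length ≤ n := by
            simp [List.map_cons, List.sum_cons] at hn
            omega
          rw [pvOuterA, if_pos (by simp)]
          simp only [hget]
          by_cases h8 : c.length = 8
          · rw [if_pos h8]
            have hstep : pvOuterA fA (done ++ c :: rest) (done.length + 1) =
                (done ++ [c]) ++ pvOuterB fB rest := by
              rw [List.append_cons done c rest,
                  show done.length + 1 = (done ++ [c]).length by simp]
              exact ih rest hμ (fun d hd => hinv d (List.mem_cons_of_mem _ hd))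
                (done ++ [c]) fA fB hrA hrB
            rw [hstep, pvOuterB]
            have hfb : pvFillB c rest = (c, rest) := by
              rw [pvFillB.eq_def, if_neg (by omega)]
            rw [hfb]
            simp
          · rw [if_neg h8]
            have hlt : c.length < 8 := by
              have := (hinv c (by simp)).2
              omega
            have hfu : rest.length < (done ++ c :: rest).length := by simp; omega
            obtain ⟨c0, x', heq, hpad, hx'⟩ :=
              pvBorrow_eq rest (done ++ c :: rest).length c c done hfu
                (fun d hd => (hinv d (List.mem_cons_of_mem _ hd)).1) hlt
            rw [heq]
            have hinvT : ∀ d ∈ (pvFillB c rest).2, d ≠ [] ∧ d.length ≤ 8 :=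
              pvFillB_inv c rest (fun d hd => hinv d (List.mem_cons_of_mem _ hd))
            have hμT : (((pvFillB c rest).2.map List.length).sum + (pvFillB c rest).2.length) ≤ n :=
              le_trans (pvFillB_measure c rest) hμ
            have hlenT : (pvFillB c rest).2.length ≤ rest.length := pvFillB_len c rest
            have hrec : ∀ y : List Char, y = (pvFillB c rest).1 →
                pvOuterA fA (done ++ y :: (pvFillB c rest).2) (done.length + 1) =
                  done ++ pvOuterB (fB + 1) (c :: rest) := by
              intro y hy
              rw [List.append_cons done y, show done.length + 1 = (done ++ [y]).length by simp,
                  ih (pvFillB c rest).2 hμT hinvT (done ++ [y]) fA fB (by omega) (by omega),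
                  pvOuterB]
              simp [hy]
            by_cases hc0 : c0.length < 8
            · rw [if_pos hc0]
              have hset : (done ++ x' :: (pvFillB c rest).2).set done.length
                  (List.replicate (8 - c0.length) '0' ++ c0) =
                  done ++ (List.replicate (8 - c0.length) '0' ++ c0) :: (pvFillB c rest).2 :=
                pvSetMid _ _ _ _
              rw [hset]
              exact hrec _ (by rw [← hpad, if_pos hc0])
            · rw [if_neg hc0]
              have hx := hx' hc0
              subst hx
              exact hrec _ (by rw [← hpad, if_neg hc0])

-- ===== VERDICT (by name: the statement is the Claim_ definition above) =====
theorem fill_to_32bit_spec : Claim_equal_fill_to_32bit := by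
  intro lines _
  unfold Spec_fill_to_32bit fill_to_32bit fill_to_32bit_alt
  rw [pvNorm_eq_chunks]
  have := pvOuter_eq (((pvChunksB (lines.map String.toList)).map List.length).sum +
      (pvChunksB (lines.map String.toList)).length) (pvChunksB (lines.map String.toList))
      le_rfl (pvChunksB_inv _) [] (pvChunksB (lines.map String.toList)).length
      (pvChunksB (lines.map String.toList)).length le_rfl le_rfl
  simpa using congrArg (List.map String.ofList) this
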